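-- pv_equiv track=rewrite | github.com/angrysoft/homedaemon | src/SmartHouse.py | nSort
-- ===== SOURCE A (Python) =====
-- def nSort(l):
--     """Sort list of digits and text"""
--     digit = list()
--     text = list()
--     for i in l:
--         if i.isdigit():
--             digit.append(i)
--         else:
--             text.append(i)
--     digit.sort(key=int)
--     text.sort()
--     digit.extend(text)
--     return digit
-- ===== SOURCE B (Python) =====
-- def nSort(l):
--     """Sort list of digits and text"""
--     return sorted(l, key=lambda x: (not x.isdigit(), int(x) if x.isdigit() else x))
-- ===== Notes on version B (the rewrite author's own statement) =====
-- stated objective: simpler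
-- what changed: Replaced the partition loop plus two separate sorts and a concatenation by a single stable sort with a composite key (group flag, numeric-or-lexicographic subkey).
import Mathlib
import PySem

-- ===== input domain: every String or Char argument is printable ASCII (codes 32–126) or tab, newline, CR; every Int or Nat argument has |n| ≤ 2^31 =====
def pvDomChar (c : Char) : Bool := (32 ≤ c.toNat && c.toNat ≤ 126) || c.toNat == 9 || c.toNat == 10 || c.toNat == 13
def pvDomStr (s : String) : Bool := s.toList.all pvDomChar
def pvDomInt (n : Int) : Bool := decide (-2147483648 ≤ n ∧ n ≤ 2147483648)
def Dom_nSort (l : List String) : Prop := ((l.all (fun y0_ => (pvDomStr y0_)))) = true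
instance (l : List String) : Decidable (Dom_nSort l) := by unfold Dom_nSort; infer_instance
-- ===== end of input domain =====

-- B replaces the partition loop + two separate sorts + concatenation by one stable sort with a
-- composite key; objective: simpler.

-- ===== PORT A =====
-- key=int on the digit strings; on a string that passed isdigit, int() always succeeds, so getD 0 is never the raising case
def pvKeyInt (s : String) : Int := (PySem.Int.ofStr? s).getD 0

def nSort (l : List String) : List String :=
  let pt := l.foldl
    (fun (p : List String × List String) i =>
      if PySem.Str.strIsdigit i then (p.1 ++ [i], p.2) else (p.1, p.2 ++ [i]))
    ([], [])
  let digit := PySem.List.sorted pt.1 pvKeyInt false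
  let text := PySem.List.sorted pt.2 (fun x => x) false
  digit ++ text

-- ===== PORT B =====
-- Source B's tuple key (not x.isdigit(), int(x) if x.isdigit() else x): the bool component puts the
-- digit group (inl) before the text group (inr) and the second components are only compared inside
-- a group — exactly the lexicographic order on Int ⊕ₗ String.
def pvKeyB (x : String) : Lex (Int ⊕ String) :=
  if PySem.Str.strIsdigit x then toLex (Sum.inl (pvKeyInt x)) else toLex (Sum.inr x)

def nSort_alt (l : List String) : List String :=
  PySem.List.sorted l pvKeyB false

-- ===== PRECONDITION & SPEC =====
def Spec_nSort (l : List String) (out : List String) : Prop := out = nSort_alt l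
instance (l : List String) (out : List String) : Decidable (Spec_nSort l out) := by unfold Spec_nSort; infer_instance

-- ===== CLAIM (what is proved, stated in full; the proofs are below) =====
def Claim_equal_nSort : Prop := ∀ (l : List String), Dom_nSort l → Spec_nSort l (nSort l)

-- ===== LEMMAS AND PROOFS =====

-- abbreviations for the three comparison predicates of the insertion sorts
def pvBK (a b : String) : Bool := decide (pvKeyB a < pvKeyB b)
def pvBD (a b : String) : Bool := decide (pvKeyInt a < pvKeyInt b)
def pvBT (a b : String) : Bool := decide (a < b)

theorem pvBK_digit_digit (a b : String) (ha : PySem.Str.strIsdigit a = true)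
    (hb : PySem.Str.strIsdigit b = true) : pvBK a b = pvBD a b := by
  have ha' : PySem.Chars.strIsdigit a.toList = true := by simpa using ha
  have hb' : PySem.Chars.strIsdigit b.toList = true := by simpa using hb
  simp [pvBK, pvBD, pvKeyB, ha', hb', Sum.Lex.inl_lt_inl_iff]

theorem pvBK_digit_text (a b : String) (ha : PySem.Str.strIsdigit a = true)
    (hb : PySem.Str.strIsdigit b = false) : pvBK a b = true := by
  have ha' : PySem.Chars.strIsdigit a.toList = true := by simpa using ha
  have hb' : PySem.Chars.strIsdigit b.toList = false := by simpa using hb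
  simp [pvBK, pvKeyB, ha', hb', Sum.Lex.inl_lt_inr]

theorem pvBK_text_digit (a b : String) (ha : PySem.Str.strIsdigit a = false)
    (hb : PySem.Str.strIsdigit b = true) : pvBK a b = false := by
  have ha' : PySem.Chars.strIsdigit a.toList = false := by simpa using ha
  have hb' : PySem.Chars.strIsdigit b.toList = true := by simpa using hb
  simp [pvBK, pvKeyB, ha', hb', Sum.Lex.not_inr_lt_inl]

theorem pvBK_text_text (a b : String) (ha : PySem.Str.strIsdigit a = false)
    (hb : PySem.Str.strIsdigit b = false) : pvBK a b = pvBT a b := by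
  have ha' : PySem.Chars.strIsdigit a.toList = false := by simpa using ha
  have hb' : PySem.Chars.strIsdigit b.toList = false := by simpa using hb
  simp [pvBK, pvBT, pvKeyB, ha', hb', Sum.Lex.inr_lt_inr_iff,
    String.lt_iff_toList_lt]

theorem pv_ins_before_all (x : String) (ys : List String)
    (h : ∀ y ∈ ys, pvBK x y = true) :
    PySem.List.insertBy pvBK x ys = x :: ys := by
  cases ys with
  | nil => rfl
  | cons y ys => simp [PySem.List.insertBy, h y (by simp)]

-- inserting a digit string into (digits ++ texts) stays inside the digit prefix
theorem pv_insL (x : String) (accD accT : List String)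
    (hx : PySem.Str.strIsdigit x = true)
    (hD : ∀ d ∈ accD, PySem.Str.strIsdigit d = true)
    (hT : ∀ t ∈ accT, PySem.Str.strIsdigit t = false) :
    PySem.List.insertBy pvBK x (accD ++ accT)
      = PySem.List.insertBy pvBD x accD ++ accT := by
  induction accD with
  | nil =>
      simpa [PySem.List.insertBy] using
        pv_ins_before_all x accT (fun t ht => pvBK_digit_text x t hx (hT t ht))
  | cons d ds ih =>
      have hd : PySem.Str.strIsdigit d = true := hD d (by simp)
      have hk : pvBK x d = pvBD x d := pvBK_digit_digit x d hx hd
      simp only [List.cons_append, PySem.List.insertBy, hk]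
      by_cases h : pvBD x d = true
      · simp [h]
      · simp only [eq_false_of_ne_true h, Bool.false_eq_true, if_false]
        rw [ih (fun e he => hD e (by simp [he])), List.cons_append]

-- inserting a text string into (digits ++ texts) stays inside the text suffix
theorem pv_insT (x : String) (accT : List String)
    (hx : PySem.Str.strIsdigit x = false)
    (hT : ∀ t ∈ accT, PySem.Str.strIsdigit t = false) :
    PySem.List.insertBy pvBK x accT = PySem.List.insertBy pvBT x accT := by
  induction accT with
  | nil => rfl
  | cons t ts ih =>
      have hk : pvBK x t = pvBT x t := pvBK_text_text x t hx (hT t (by simp))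
      simp only [PySem.List.insertBy, hk]
      by_cases h : pvBT x t = true
      · simp [h]
      · simp only [eq_false_of_ne_true h, Bool.false_eq_true, if_false]
        rw [ih (fun e he => hT e (by simp [he]))]

theorem pv_insR (x : String) (accD accT : List String)
    (hx : PySem.Str.strIsdigit x = false)
    (hD : ∀ d ∈ accD, PySem.Str.strIsdigit d = true)
    (hT : ∀ t ∈ accT, PySem.Str.strIsdigit t = false) :
    PySem.List.insertBy pvBK x (accD ++ accT)
      = accD ++ PySem.List.insertBy pvBT x accT := by
  induction accD with
  | nil => simpa using pv_insT x accT hx hT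
  | cons d ds ih =>
      have hk : pvBK x d = false := pvBK_text_digit x d hx (hD d (by simp))
      simp only [List.cons_append, PySem.List.insertBy, hk, Bool.false_eq_true, if_false]
      rw [ih (fun e he => hD e (by simp [he]))]

-- the single insertion sort with the composite key splits into the two per-group insertion sorts
theorem pv_main (l accD accT : List String)
    (hD : ∀ d ∈ accD, PySem.Str.strIsdigit d = true)
    (hT : ∀ t ∈ accT, PySem.Str.strIsdigit t = false) :
    l.foldl (fun acc x => PySem.List.insertBy pvBK x acc) (accD ++ accT)
      = (l.filter (fun i => PySem.Str.strIsdigit i)).foldl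
          (fun acc x => PySem.List.insertBy pvBD x acc) accD
        ++ (l.filter (fun i => ! PySem.Str.strIsdigit i)).foldl
          (fun acc x => PySem.List.insertBy pvBT x acc) accT := by
  induction l generalizing accD accT with
  | nil => simp
  | cons x xs ih =>
      by_cases hx : PySem.Str.strIsdigit x = true
      · simp only [List.foldl_cons, List.filter_cons, hx, Bool.not_true, if_true]
        rw [pv_insL x accD accT hx hD hT]
        simp only [Bool.false_eq_true, if_false]
        exact ih _ _
          (fun d hd => by
            rcases (PySem.List.mem_insertBy _ _ _ _).1 hd with h | h
            · exact h ▸ hx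
            · exact hD d h)
          hT
      · have hx' : PySem.Str.strIsdigit x = false := eq_false_of_ne_true hx
        simp only [List.foldl_cons, List.filter_cons, hx', Bool.not_false, if_true]
        rw [pv_insR x accD accT hx' hD hT]
        simp only [Bool.false_eq_true, if_false]
        exact ih _ _ hD
          (fun t ht => by
            rcases (PySem.List.mem_insertBy _ _ _ _).1 ht with h | h
            · exact h ▸ hx'
            · exact hT t h)

-- A's partition loop is the two filters
theorem pv_partition (l accD accT : List String) :
    l.foldl
      (fun (p : List String × List String) i =>
        if PySem.Str.strIsdigit i then (p.1 ++ [i], p.2) else (p.1, p.2 ++ [i]))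
      (accD, accT)
      = (accD ++ l.filter (fun i => PySem.Str.strIsdigit i),
         accT ++ l.filter (fun i => ! PySem.Str.strIsdigit i)) := by
  induction l generalizing accD accT with
  | nil => simp
  | cons x xs ih =>
      simp only [List.foldl_cons, List.filter_cons]
      by_cases hx : PySem.Str.strIsdigit x = true
      · simp only [hx, if_true, Bool.not_true, Bool.false_eq_true, if_false, ih]
        simp
      · have hx' : PySem.Str.strIsdigit x = false := eq_false_of_ne_true hx
        simp only [hx', Bool.false_eq_true, if_false, Bool.not_false, if_true, ih]
        simp

-- ===== VERDICT (by name: the statement is the Claim_ definition above) =====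
theorem nSort_spec : Claim_equal_nSort := by
  intro l _
  show nSort l = nSort_alt l
  simp only [nSort, nSort_alt]
  rw [pv_partition l [] []]
  simp only [List.nil_append]
  rw [PySem.List.sorted_eq_foldl_insertBy, PySem.List.sorted_eq_foldl_insertBy,
      PySem.List.sorted_eq_foldl_insertBy]
  exact (pv_main l [] [] (by simp) (by simp)).symm
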